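-- pv_equiv track=rewrite | github.com/TransformersWsz/leetcode | point2offer/JZ45_扑克牌顺子.py | IsContinuous
-- ===== SOURCE A (Python) =====
-- def IsContinuous(numbers):
--     # write code here
--     if not numbers or len(numbers) == 0:
--         return False
--     d = {}
--     minv, maxv = float("inf"), float("-inf")
--     for item in numbers:
--         if item != 0:
--             minv = min(minv, item)
--             maxv = max(maxv, item)
--             if maxv - minv > len(numbers) - 1:
--                 return False
--         if item not in d:
--             d[item] = 1
--         else:
--             d[item] += 1
--
--     total = len(numbers)
--     need = total
--     for i in range(total):
--         need_item = minv + i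
--         if need_item in d:
--             d[need_item] -= 1
--             need -= 1
--     if need == 0:
--         return True
--     else:
--         if 0 in d:
--             return bool(need==d[0])
--         return False
-- ===== SOURCE B (Python) =====
-- def IsContinuous(numbers):
--     if not numbers:
--         return False
--     seen = set()
--     mm = None  # (minv, maxv) over the non-zero cards seen so far
--     for x in numbers:
--         if x == 0:
--             continue
--         if x in seen:
--             return False
--         seen.add(x)
--         if mm is None:
--             mm = (x, x)
--         else:
--             mm = (min(mm[0], x), max(mm[1], x))
--     return mm is None or mm[1] - mm[0] <= len(numbers) - 1
-- ===== Notes on version B (the rewrite author's own statement) =====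
-- stated objective: simpler
-- what changed: A builds a count-dict and then fills consecutive slots from the running minimum in a second range(total) loop, deciding via leftover 'need' arithmetic; B is the standard single pass that skips jokers, rejects a repeated non-zero card via a seen-set, and finally checks max-min <= len-1.
import Mathlib
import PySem

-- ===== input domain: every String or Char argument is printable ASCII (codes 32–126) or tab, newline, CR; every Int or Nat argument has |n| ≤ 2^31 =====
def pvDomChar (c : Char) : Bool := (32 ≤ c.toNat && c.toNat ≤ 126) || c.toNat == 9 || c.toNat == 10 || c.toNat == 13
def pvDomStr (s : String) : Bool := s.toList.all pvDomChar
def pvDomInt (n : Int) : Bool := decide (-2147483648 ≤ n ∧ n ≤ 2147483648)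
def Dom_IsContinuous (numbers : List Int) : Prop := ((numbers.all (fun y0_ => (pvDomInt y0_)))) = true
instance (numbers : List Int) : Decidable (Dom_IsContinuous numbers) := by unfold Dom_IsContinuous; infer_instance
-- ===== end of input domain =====

-- B replaces A's count-dict plus consecutive-slot-filling second pass by the standard single
-- pass (set-based duplicate detection + min/max spread check); objective: simpler.


-- ===== PORT A =====
-- Both Pythons keep a running (minv, maxv) over the non-zero items; A initialises them to
-- float('inf')/float('-inf') and B to None, and both replace the pair at the first non-zero
-- item, so 'Option (Int × Int)' (none = no non-zero item yet) models the pair exactly.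
def mmUpd (mm : Option (Int × Int)) (x : Int) : Int × Int :=
  match mm with
  | none => (x, x)
  | some (a, b) => (min a x, max b x)

-- 'if item not in d: d[item] = 1 else: d[item] += 1'
def updA (d : PySem.Dict Int Int) (x : Int) : PySem.Dict Int Int :=
  if !d.contains x then d.insert x 1 else d.modify x 0 (· + 1)

-- A's first loop; 'none' = the early 'return False' on 'maxv - minv > len(numbers) - 1'
def aLoop1 : List Int → Int → PySem.Dict Int Int → Option (Int × Int) →
    Option (PySem.Dict Int Int × Option (Int × Int))
  | [], _, d, mm => some (d, mm)
  | item :: rest, n, d, mm =>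
    if item ≠ 0 then
      let p := mmUpd mm item
      if p.2 - p.1 > n - 1 then none
      else aLoop1 rest n (updA d item) (some p)
    else aLoop1 rest n (updA d item) mm

-- A's second loop over range(total); with minv still inf ('mm = none') the float key
-- 'minv + i' is never in the int-keyed dict, so that step does nothing — exact.
def aLoop2 : List Int → Option (Int × Int) → PySem.Dict Int Int → Int →
    PySem.Dict Int Int × Int
  | [], _, d, need => (d, need)
  | i :: rest, mm, d, need =>
    match mm with
    | none => aLoop2 rest none d need
    | some (a, b) =>
      if d.contains (a + i) then
        aLoop2 rest (some (a, b)) (d.modify (a + i) 0 (· - 1)) (need - 1)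
      else aLoop2 rest (some (a, b)) d need

def IsContinuous (numbers : List Int) : Bool :=
  if numbers = [] then false
  else
    let n : Int := (numbers.length : Int)
    match aLoop1 numbers n PySem.Dict.empty none with
    | none => false
    | some (d, mm) =>
      match aLoop2 (PySem.List.pyRange 0 n 1) mm d n with
      | (d2, need) =>
        if need = 0 then true
        else if d2.contains 0 then decide (need = d2.getD 0 0) else false

-- ===== PORT B =====
-- B's single pass: skip jokers, 'return False' (= none) on a repeated card, else extend
-- the seen-set and the running (minv, maxv) pair.
def bLoop : List Int → PySem.Set Int → Option (Int × Int) → Option (Option (Int × Int))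
  | [], _, mm => some mm
  | x :: rest, seen, mm =>
    if x = 0 then bLoop rest seen mm
    else if PySem.Set.contains seen x then none
    else bLoop rest (PySem.Set.add seen x) (some (mmUpd mm x))

def IsContinuous_alt (numbers : List Int) : Bool :=
  if numbers = [] then false
  else
    match bLoop numbers PySem.Set.empty none with
    | none => false
    | some none => true
    | some (some (a, b)) => decide (b - a ≤ (numbers.length : Int) - 1)

-- ===== PRECONDITION & SPEC =====
def Spec_IsContinuous (numbers : List Int) (out : Bool) : Prop := out = IsContinuous_alt numbers
instance (numbers : List Int) (out : Bool) : Decidable (Spec_IsContinuous numbers out) := by unfold Spec_IsContinuous; infer_instance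

-- ===== CLAIM (what is proved, stated in full; the proofs are below) =====
def Claim_equal_IsContinuous : Prop := ∀ (numbers : List Int), Dom_IsContinuous numbers → Spec_IsContinuous numbers (IsContinuous numbers)

-- ===== LEMMAS AND PROOFS =====

-- the common min/max fold over the non-zero items
def mmF (mm : Option (Int × Int)) (l : List Int) : Option (Int × Int) :=
  l.foldl (fun m x => if x = 0 then m else some (mmUpd m x)) mm

theorem mmF_nil (mm : Option (Int × Int)) : mmF mm [] = mm := rfl

theorem mmF_cons (mm : Option (Int × Int)) (x : Int) (l : List Int) :
    mmF mm (x :: l) = mmF (if x = 0 then mm else some (mmUpd mm x)) l := rfl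

theorem mmF_mono (l : List Int) : ∀ (a b : Int), ∃ a' b',
    mmF (some (a, b)) l = some (a', b') ∧ a' ≤ a ∧ b ≤ b' := by
  induction l with
  | nil => intro a b; exact ⟨a, b, rfl, le_refl _, le_refl _⟩
  | cons x l ih =>
    intro a b
    by_cases hx : x = 0
    · simpa [mmF_cons, hx] using ih a b
    · obtain ⟨a', b', h, h1, h2⟩ := ih (min a x) (max b x)
      exact ⟨a', b', by simpa [mmF_cons, hx, mmUpd] using h,
        le_trans h1 (min_le_left _ _), le_trans (le_max_left _ _) h2⟩

theorem mmF_none_iff (l : List Int) : mmF none l = none ↔ ∀ x ∈ l, x = 0 := by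
  induction l with
  | nil => simp [mmF_nil]
  | cons x l ih =>
    by_cases hx : x = 0
    · rw [mmF_cons, if_pos hx]
      rw [ih]
      constructor
      · intro h y hy
        rcases List.mem_cons.1 hy with rfl | hy'
        · exact hx
        · exact h y hy'
      · intro h y hy; exact h y (List.mem_cons_of_mem _ hy)
    · rw [mmF_cons, if_neg hx]
      have he : (if x = 0 then (none : Option (Int × Int)) else some (mmUpd none x)) =
          some (x, x) := by simp [hx, mmUpd]
      obtain ⟨a', b', h, -, -⟩ := mmF_mono l x x
      constructor
      · intro hc
        rw [show some (mmUpd none x) = some (x, x) by simp [mmUpd], h] at hc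
        exact absurd hc (by simp)
      · intro hall; exact absurd (hall x (List.mem_cons_self)) hx

theorem mmF_bounds (l : List Int) : ∀ (mm : Option (Int × Int)) (a b : Int),
    mmF mm l = some (a, b) → ∀ x ∈ l, x ≠ 0 → a ≤ x ∧ x ≤ b := by
  induction l with
  | nil => simp
  | cons y l ih =>
    intro mm a b h x hx hx0
    rcases List.mem_cons.1 hx with rfl | hx'
    · rw [mmF_cons, if_neg hx0] at h
      rcases hmm : mmUpd mm x with ⟨p, q⟩
      rw [hmm] at h
      obtain ⟨a', b', h', h1, h2⟩ := mmF_mono l p q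
      rw [h'] at h
      obtain ⟨rfl, rfl⟩ : a' = a ∧ b' = b := by
        constructor <;> { injection h with h''; simp_all }
      have hp : p ≤ x ∧ x ≤ q := by
        rcases mm with _ | ⟨c, d⟩ <;> simp [mmUpd] at hmm <;> omega
      exact ⟨le_trans h1 hp.1, le_trans hp.2 h2⟩
    · by_cases hy : y = 0
      · rw [mmF_cons, if_pos hy] at h; exact ih mm a b h x hx' hx0
      · rw [mmF_cons, if_neg hy] at h; exact ih _ a b h x hx' hx0

theorem updA_eq (d : PySem.Dict Int Int) (x : Int) : updA d x = d.modify x 0 (· + 1) := by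
  unfold updA PySem.Dict.modify
  by_cases h : d.contains x
  · simp [h]
  · rw [PySem.Dict.getD_of_not_contains d 0 (by simpa using h)]
    simp [h]

theorem foldl_updA (l : List Int) : l.foldl updA PySem.Dict.empty = PySem.Dict.counter l := by
  rw [PySem.Dict.counter_eq_foldl]
  exact PySem.List.foldl_congr_mem l _ _ _ (by intro d x _; rw [updA_eq])

theorem aLoop1_eq (l : List Int) : ∀ (n : Int) (d : PySem.Dict Int Int) (mm : Option (Int × Int)),
    (∀ a b, mm = some (a, b) → ¬ b - a > n - 1) →
    aLoop1 l n d mm =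
      match mmF mm l with
      | none => some (l.foldl updA d, none)
      | some (a, b) => if b - a > n - 1 then none else some (l.foldl updA d, some (a, b)) := by
  induction l with
  | nil =>
    intro n d mm hok
    rcases mm with _ | ⟨a, b⟩
    · rfl
    · simp [aLoop1, mmF_nil, hok a b rfl]
  | cons x l ih =>
    intro n d mm hok
    by_cases hx : x = 0
    · rw [mmF_cons, if_pos hx]
      simp only [aLoop1]
      rw [if_neg (not_not_intro hx)]
      exact ih n (updA d x) mm hok
    · rw [mmF_cons, if_neg hx]
      simp only [aLoop1]
      rw [if_pos hx]
      rcases hpq : mmUpd mm x with ⟨p, q⟩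
      by_cases hbad : q - p > n - 1
      · rw [if_pos hbad]
        obtain ⟨a', b', h', h1, h2⟩ := mmF_mono l p q
        simp only [h']
        rw [if_pos (by omega)]
      · rw [if_neg hbad]
        refine ih n (updA d x) (some (p, q)) ?_
        intro a b hab
        obtain ⟨rfl, rfl⟩ : p = a ∧ q = b := by simpa [Prod.ext_iff] using hab
        exact hbad

theorem aLoop1_none (l : List Int) (n : Int) (hmm : mmF none l = none) :
    aLoop1 l n PySem.Dict.empty none = some (PySem.Dict.counter l, none) := by
  rw [aLoop1_eq l n _ none (by intro A B h; cases h), hmm, foldl_updA]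

theorem aLoop1_some (l : List Int) (n : Int) (a b : Int) (hmm : mmF none l = some (a, b)) :
    aLoop1 l n PySem.Dict.empty none =
      if b - a > n - 1 then none else some (PySem.Dict.counter l, some (a, b)) := by
  rw [aLoop1_eq l n _ none (by intro A B h; cases h), hmm, foldl_updA]

theorem aLoop2_none (l : List Int) : ∀ (d : PySem.Dict Int Int) (need : Int),
    aLoop2 l none d need = (d, need) := by
  induction l with
  | nil => intro d need; rfl
  | cons i l ih => intro d need; simpa [aLoop2] using ih d need

theorem aLoop2_contains (l : List Int) : ∀ (a b : Int) (d : PySem.Dict Int Int) (need k : Int),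
    (aLoop2 l (some (a, b)) d need).1.contains k = d.contains k := by
  induction l with
  | nil => intro a b d need k; rfl
  | cons i l ih =>
    intro a b d need k
    simp only [aLoop2]
    by_cases h : d.contains (a + i) = true
    · rw [if_pos h, ih, PySem.Dict.contains_modify]
      by_cases hk : k = a + i
      · simp [hk, h]
      · simp [hk]
    · rw [if_neg h, ih]

theorem aLoop2_snd (l : List Int) : ∀ (a b : Int) (d : PySem.Dict Int Int) (need : Int),
    (aLoop2 l (some (a, b)) d need).2 =
      need - (l.countP (fun i => d.contains (a + i)) : Int) := by
  induction l with
  | nil => intro a b d need; simp [aLoop2]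
  | cons i l ih =>
    intro a b d need
    simp only [aLoop2]
    by_cases h : d.contains (a + i) = true
    · rw [if_pos h, ih]
      have hc : l.countP (fun j => (d.modify (a + i) 0 (· - 1)).contains (a + j)) =
          l.countP (fun j => d.contains (a + j)) := by
        apply List.countP_congr
        intro j _
        rw [PySem.Dict.contains_modify]
        by_cases hj : a + j = a + i
        · simp [hj, h]
        · simp [hj]
      rw [hc, List.countP_cons, h]
      rw [if_pos rfl]
      push_cast
      ring
    · rw [if_neg h, ih, List.countP_cons]
      simp [h]

theorem aLoop2_getD0 (l : List Int) : ∀ (a b : Int) (d : PySem.Dict Int Int) (need : Int),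
    (aLoop2 l (some (a, b)) d need).1.getD 0 0 =
      d.getD 0 0 - (l.countP (fun i => a + i == 0 && d.contains (a + i)) : Int) := by
  induction l with
  | nil => intro a b d need; simp [aLoop2]
  | cons i l ih =>
    intro a b d need
    simp only [aLoop2]
    by_cases h : d.contains (a + i) = true
    · rw [if_pos h, ih]
      have hc : l.countP (fun j => a + j == 0 && (d.modify (a + i) 0 (· - 1)).contains (a + j)) =
          l.countP (fun j => a + j == 0 && d.contains (a + j)) := by
        apply List.countP_congr
        intro j _
        rw [PySem.Dict.contains_modify]
        by_cases hj : a + j = a + i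
        · simp [hj, h]
        · simp [hj]
      rw [hc, List.countP_cons]
      rw [PySem.Dict.getD_modify]
      by_cases hz : (0 : Int) = a + i
      · rw [if_pos hz]
        have hb : (a + i == 0 && d.contains (a + i)) = true := by simp [h]; omega
        rw [hb, if_pos rfl, ← hz]
        push_cast
        ring
      · rw [if_neg hz]
        have hb : (a + i == 0 && d.contains (a + i)) = false := by
          simp only [Bool.and_eq_false_iff, beq_eq_false_iff_ne]
          left; omega
        rw [hb]
        push_cast
        ring
    · rw [if_neg h, ih, List.countP_cons]
      have hb : (a + i == 0 && d.contains (a + i)) = false := by simp [h]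
      rw [hb]
      simp

-- duplicate-freedom of the non-zero items relative to a seen-set
def nzDF : List Int → PySem.Set Int → Bool
  | [], _ => true
  | x :: rest, seen =>
    if x = 0 then nzDF rest seen
    else !PySem.Set.contains seen x && nzDF rest (PySem.Set.add seen x)

theorem bLoop_eq (l : List Int) : ∀ (seen : PySem.Set Int) (mm : Option (Int × Int)),
    bLoop l seen mm = if nzDF l seen then some (mmF mm l) else none := by
  induction l with
  | nil => intro seen mm; rfl
  | cons x l ih =>
    intro seen mm
    by_cases hx : x = 0
    · simp only [bLoop, nzDF, if_pos hx, mmF_cons]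
      exact ih seen mm
    · simp only [bLoop, nzDF, if_neg hx, mmF_cons]
      by_cases hs : PySem.Set.contains seen x = true
      · rw [if_pos hs, if_neg (by
          simp only [Bool.and_eq_true, Bool.not_eq_true']
          rintro ⟨hc, -⟩
          rw [hs] at hc
          exact absurd hc (by decide))]
      · rw [if_neg hs, ih]
        by_cases hdf : nzDF l (PySem.Set.add seen x) = true
        · rw [if_pos hdf, if_pos (by
            simp only [Bool.and_eq_true, Bool.not_eq_true']
            exact ⟨Bool.eq_false_iff.2 hs, hdf⟩)]
        · rw [if_neg hdf, if_neg (by simp [hdf])]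

theorem set_contains_iff (s : PySem.Set Int) (x : Int) :
    PySem.Set.contains s x = true ↔ x ∈ s := by
  simp [PySem.Set.contains]

theorem nzDF_iff (l : List Int) : ∀ (s : PySem.Set Int),
    nzDF l s = true ↔
      ((l.filter (fun x => !(x == 0))).Nodup ∧ ∀ x ∈ l, x ≠ 0 → x ∉ s) := by
  induction l with
  | nil => simp [nzDF]
  | cons x l ih =>
    intro s
    by_cases hx : x = 0
    · simp only [nzDF, if_pos hx, List.filter_cons]
      rw [ih]
      have : (!(x == 0)) = false := by simp [hx]
      rw [this]
      simp only [Bool.false_eq_true, if_false]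
      constructor
      · rintro ⟨h1, h2⟩
        refine ⟨h1, ?_⟩
        intro y hy hy0
        rcases List.mem_cons.1 hy with rfl | hy'
        · exact absurd hx hy0
        · exact h2 y hy' hy0
      · rintro ⟨h1, h2⟩
        exact ⟨h1, fun y hy hy0 => h2 y (List.mem_cons_of_mem _ hy) hy0⟩
    · simp only [nzDF, if_neg hx, List.filter_cons]
      have : (!(x == 0)) = true := by simp [hx]
      rw [this]
      simp only [if_pos trivial, Bool.and_eq_true, Bool.not_eq_true']
      rw [ih, List.nodup_cons]
      constructor
      · rintro ⟨hns, hnd, hall⟩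
        have hxnl : x ∉ l := by
          intro hxl
          exact absurd (PySem.Set.mem_add s x x).2 (by simpa using hall x hxl hx)
        refine ⟨⟨by simp [hxnl], hnd⟩, ?_⟩
        intro y hy hy0
        rcases List.mem_cons.1 hy with rfl | hy'
        · intro hm
          rw [(set_contains_iff s y).2 hm] at hns
          exact absurd hns (by decide)
        · intro hmem
          exact hall y hy' hy0 ((PySem.Set.mem_add s x y).2 (Or.inl hmem))
      · rintro ⟨⟨hxnf, hnd⟩, hall⟩
        have hxns : x ∉ s := hall x List.mem_cons_self hx
        refine ⟨Bool.eq_false_iff.2 (fun hc => hxns ((set_contains_iff s x).1 hc)), hnd, ?_⟩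
        intro y hy hy0 hmem
        rcases (PySem.Set.mem_add s x y).1 hmem with hys | rfl
        · exact hall y (List.mem_cons_of_mem _ hy) hy0 hys
        · exact hxnf (by simp [List.mem_filter, hy, hy0])

theorem ofList_sublist (xs : List Int) : (PySem.Set.ofList xs).Sublist xs := by
  induction xs using List.reverseRecOn with
  | nil => simp [PySem.Set.ofList_eq_foldl]
  | append_singleton xs x ih =>
    rw [PySem.Set.ofList_eq_foldl, List.foldl_append, ← PySem.Set.ofList_eq_foldl]
    show (PySem.Set.add (PySem.Set.ofList xs) x).Sublist (xs ++ [x])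
    unfold PySem.Set.add
    by_cases h : (PySem.Set.ofList xs).contains x = true
    · rw [if_pos h]
      exact ih.trans (List.sublist_append_left _ _)
    · rw [if_neg h]
      exact List.Sublist.append ih (List.Sublist.refl _)

theorem nodup_iff_len (xs : List Int) :
    xs.Nodup ↔ (PySem.Set.ofList xs).length = xs.length := by
  constructor
  · intro h; rw [PySem.Set.ofList_eq_self_of_nodup _ h]
  · intro h
    rw [← (ofList_sublist xs).eq_of_length h]
    exact PySem.Set.nodup_ofList xs

theorem countP_split (l : List Int) (p q : Int → Bool) :
    l.countP p = l.countP (fun k => p k && q k) + l.countP (fun k => p k && !q k) := by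
  induction l with
  | nil => simp
  | cons x l ih =>
    simp only [List.countP_cons, ih]
    cases hp : p x <;> cases hq : q x <;> simp <;> omega

theorem countP_beq_zero (l : List Int) (hl : l.Nodup) (q : Bool) :
    l.countP (fun k => k == 0 && q) = if (0 : Int) ∈ l ∧ q = true then 1 else 0 := by
  cases q
  · simp
  · simp only [Bool.and_true]
    by_cases h0 : (0 : Int) ∈ l
    · rw [if_pos (show _ from ⟨h0, by simp⟩)]
      simpa [List.count] using List.count_eq_one_of_mem hl h0
    · rw [if_neg (by simp [h0])]
      simpa [List.count] using List.count_eq_zero_of_not_mem h0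

theorem countP_pyRange_shift (a n : Int) (p : Int → Bool) :
    (PySem.List.pyRange 0 n 1).countP (fun i => p (a + i)) =
      (PySem.List.pyRange a (a + n) 1).countP p := by
  rw [PySem.List.pyRange_one, PySem.List.pyRange_one, List.countP_map, List.countP_map]
  rw [show a + n - a = n - 0 by ring]
  apply List.countP_congr
  intro k _
  simp [Function.comp]

theorem main_eq (numbers : List Int) : IsContinuous numbers = IsContinuous_alt numbers := by
  by_cases hnil : numbers = []
  · simp [IsContinuous, IsContinuous_alt, hnil]
  · have hok : ∀ (A B : Int), (none : Option (Int × Int)) = some (A, B) →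
        ¬ B - A > (numbers.length : Int) - 1 := by intro A B h; cases h
    have hB : IsContinuous_alt numbers =
        (if nzDF numbers PySem.Set.empty = true
         then (match mmF none numbers with
               | none => true
               | some (a, b) => decide (b - a ≤ (numbers.length : Int) - 1))
         else false) := by
      simp only [IsContinuous_alt, if_neg hnil, bLoop_eq]
      by_cases hdf : nzDF numbers PySem.Set.empty = true
      · rw [if_pos hdf, if_pos hdf]
        rcases mmF none numbers with _ | ⟨a, b⟩ <;> rfl
      · rw [if_neg hdf, if_neg hdf]
    rw [hB]
    rcases hmm : mmF none numbers with _ | ⟨a, b⟩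
    -- case: no non-zero card at all (minv/maxv still infinite)
    · have hall := (mmF_none_iff numbers).1 hmm
      have hdf : nzDF numbers PySem.Set.empty = true := by
        rw [nzDF_iff]
        refine ⟨?_, fun x hx hx0 => absurd (hall x hx) hx0⟩
        have hfe : numbers.filter (fun x => !(x == 0)) = [] :=
          List.filter_eq_nil_iff.2 (fun b hb => by simp [hall b hb])
        rw [hfe]; exact List.nodup_nil
      have hA1 : aLoop1 numbers (numbers.length : Int) PySem.Dict.empty none =
          some (PySem.Dict.counter numbers, none) := aLoop1_none numbers _ hmm
      have h0m : (0 : Int) ∈ numbers := by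
        rcases hh : numbers with _ | ⟨y, ys⟩
        · exact absurd hh hnil
        · have := hall y (by rw [hh]; exact List.mem_cons_self)
          rw [← this]; exact List.mem_cons_self
      have hlen0 : ¬ ((numbers.length : Int) = 0) := by
        simp only [Int.natCast_eq_zero, List.length_eq_zero_iff]
        exact hnil
      have hcont : (PySem.Dict.counter numbers).contains 0 = true := by
        rw [PySem.Dict.contains_counter]
        exact List.contains_iff_mem.2 h0m
      have hcnt : (PySem.Dict.counter numbers).getD 0 0 = (numbers.length : Int) := by
        rw [PySem.Dict.getD_counter]
        norm_cast
        exact List.count_eq_length.2 (fun b hb => (hall b hb).symm)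
      rw [if_pos hdf]
      simp only [IsContinuous, if_neg hnil, hA1, aLoop2_none]
      rw [if_neg hlen0]
      simp [hcont, hcnt]
    -- case: some non-zero cards, running min a / max b
    · by_cases hsp : b - a > (numbers.length : Int) - 1
      · have hA1 : aLoop1 numbers (numbers.length : Int) PySem.Dict.empty none = none := by
          rw [aLoop1_some numbers _ a b hmm, if_pos hsp]
        simp only [IsContinuous, if_neg hnil, hA1]
        by_cases hdf : nzDF numbers PySem.Set.empty = true
        · rw [if_pos hdf]
          exact (decide_eq_false (by omega)).symm
        · rw [if_neg hdf]
      · have hA1 : aLoop1 numbers (numbers.length : Int) PySem.Dict.empty none =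
            some (PySem.Dict.counter numbers, some (a, b)) := by
          rw [aLoop1_some numbers _ a b hmm, if_neg hsp]
        rcases h2 : aLoop2 (PySem.List.pyRange 0 (numbers.length : Int) 1) (some (a, b))
            (PySem.Dict.counter numbers) (numbers.length : Int) with ⟨d2, need⟩
        simp only [IsContinuous, if_neg hnil, hA1, h2]
        -- abbreviations
        have hbnd := mmF_bounds numbers none a b hmm
        set n : Int := (numbers.length : Int) with hn
        set nz : List Int := numbers.filter (fun x => !(x == 0)) with hnz
        set K : Nat := (PySem.Set.ofList nz).length with hK
        set Z : Nat := numbers.count 0 with hZ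
        set R : List Int := PySem.List.pyRange a (a + n) 1 with hR
        set z01 : Nat := if ((0 : Int) ∈ numbers ∧ a ≤ 0 ∧ 0 < a + n) then 1 else 0 with hz01
        have hmemnz : ∀ k : Int, k ∈ nz ↔ k ∈ numbers ∧ k ≠ 0 := by
          intro k; rw [hnz]; simp [List.mem_filter]
        have hmemR : ∀ k : Int, k ∈ R ↔ a ≤ k ∧ k < a + n := by
          intro k; rw [hR]; exact PySem.List.mem_pyRange_one
        have hnzR : ∀ k : Int, k ∈ nz → k ∈ R := by
          intro k hk
          obtain ⟨hkm, hk0⟩ := (hmemnz k).1 hk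
          obtain ⟨h1, h2'⟩ := hbnd k hkm hk0
          rw [hmemR]; omega
        -- the zero-slot count
        have hzcnt : R.countP (fun k => k == 0 && numbers.contains k) = z01 := by
          have hcg : R.countP (fun k => k == 0 && numbers.contains k) =
              R.countP (fun k => k == 0 && numbers.contains 0) := by
            apply List.countP_congr
            intro k _
            by_cases hk0 : k = 0
            · subst hk0; simp
            · simp [hk0]
          rw [hcg, countP_beq_zero R (hR ▸ PySem.List.nodup_pyRange_one a (a + n))
            (numbers.contains 0), hz01]
          by_cases hcnd : ((0 : Int) ∈ numbers ∧ a ≤ 0 ∧ 0 < a + n)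
          · rw [if_pos hcnd, if_pos ⟨(hmemR 0).2 ⟨hcnd.2.1, hcnd.2.2⟩,
              List.contains_iff_mem.2 hcnd.1⟩]
          · rw [if_neg hcnd, if_neg ?_]
            rintro ⟨hr, hc⟩
            exact hcnd ⟨List.contains_iff_mem.1 hc, ((hmemR 0).1 hr).1, ((hmemR 0).1 hr).2⟩
        -- the non-zero distinct count
        have hnzcnt : R.countP (fun k => numbers.contains k && !(k == 0)) = K := by
          rw [List.countP_eq_length_filter, hK]
          have hperm : (R.filter (fun k => numbers.contains k && !(k == 0))).Perm
              (PySem.Set.ofList nz) := by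
            rw [List.perm_ext_iff_of_nodup
              (List.Nodup.filter _ (hR ▸ PySem.List.nodup_pyRange_one a (a + n)))
              (PySem.Set.nodup_ofList nz)]
            intro k
            rw [PySem.Set.mem_ofList, List.mem_filter, hmemnz]
            constructor
            · rintro ⟨-, hpk⟩
              simp only [Bool.and_eq_true, Bool.not_eq_true', beq_eq_false_iff_ne] at hpk
              exact ⟨List.contains_iff_mem.1 hpk.1, hpk.2⟩
            · rintro ⟨hkm, hk0⟩
              refine ⟨hnzR k ((hmemnz k).2 ⟨hkm, hk0⟩), ?_⟩
              simp [hkm, hk0]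
          exact hperm.length_eq
        -- the total slot count of A's second loop
        have hCC : (PySem.List.pyRange 0 n 1).countP
            (fun i => (PySem.Dict.counter numbers).contains (a + i)) = K + z01 := by
          have h1 : (PySem.List.pyRange 0 n 1).countP
              (fun i => (PySem.Dict.counter numbers).contains (a + i)) =
              (PySem.List.pyRange 0 n 1).countP (fun i => numbers.contains (a + i)) := by
            apply List.countP_congr
            intro i _
            rw [PySem.Dict.contains_counter]
          rw [h1, countP_pyRange_shift a n (fun k => numbers.contains k), ← hR]
          rw [countP_split R (fun k => numbers.contains k) (fun k => !(k == 0))]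
          have h3 : R.countP (fun k => numbers.contains k && !(!(k == 0))) =
              R.countP (fun k => k == 0 && numbers.contains k) := by
            apply List.countP_congr
            intro k _
            cases hc : numbers.contains k <;> cases hk : k == 0 <;> simp [hc, hk]
          rw [h3, hzcnt, hnzcnt]
        have hneedv : need = n - ((K : Int) + (z01 : Int)) := by
          have := aLoop2_snd (PySem.List.pyRange 0 n 1) a b (PySem.Dict.counter numbers) n
          rw [h2] at this
          simp only [hCC] at this
          rw [this]
          push_cast
          ring
        have hd2c : d2.contains 0 = numbers.contains 0 := by
          have := aLoop2_contains (PySem.List.pyRange 0 n 1) a b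
            (PySem.Dict.counter numbers) n 0
          rw [h2] at this
          rw [this, PySem.Dict.contains_counter]
        have hd2g : d2.getD 0 0 = (Z : Int) - (z01 : Int) := by
          have := aLoop2_getD0 (PySem.List.pyRange 0 n 1) a b (PySem.Dict.counter numbers) n
          rw [h2] at this
          have hcz : (PySem.List.pyRange 0 n 1).countP
              (fun i => a + i == 0 && (PySem.Dict.counter numbers).contains (a + i)) = z01 := by
            have h1 : (PySem.List.pyRange 0 n 1).countP
                (fun i => a + i == 0 && (PySem.Dict.counter numbers).contains (a + i)) =
                (PySem.List.pyRange 0 n 1).countP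
                (fun i => (fun k => k == 0 && numbers.contains k) (a + i)) := by
              apply List.countP_congr
              intro i _
              rw [PySem.Dict.contains_counter]
            rw [h1, countP_pyRange_shift a n (fun k => k == 0 && numbers.contains k), ← hR,
              hzcnt]
          rw [this, hcz, PySem.Dict.getD_counter, hZ]
        have hlenI : n = (Z : Int) + (nz.length : Int) := by
          have := List.length_eq_countP_add_countP (fun x : Int => x == 0) (l := numbers)
          have hc1 : numbers.countP (fun x : Int => x == 0) = Z := by
            rw [hZ, List.count]
          have hc2 : numbers.countP (fun x : Int => decide ¬(x == 0) = true) = nz.length := by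
            rw [hnz, List.countP_eq_length_filter]
            congr 1
            apply List.filter_congr
            intro x _
            cases hx : x == 0 <;> simp [hx]
          rw [hn, this, hc1, hc2]
          push_cast
          ring
        have hKle : (K : Int) ≤ (nz.length : Int) := by
          have := PySem.Set.length_ofList_le nz
          rw [← hK] at this
          exact_mod_cast this
        have hz01le : (z01 : Int) ≤ 1 := by
          rw [hz01]; split <;> simp
        have hzZ : (z01 : Int) ≤ (Z : Int) := by
          rw [hz01]
          split
          · rename_i hcnd
            have : 0 < Z := by rw [hZ]; exact List.count_pos_iff.2 hcnd.1
            omega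
          · positivity
        have hdfiff : nzDF numbers PySem.Set.empty = true ↔ (K : Int) = (nz.length : Int) := by
          rw [nzDF_iff]
          have htriv : ∀ x ∈ numbers, x ≠ 0 → x ∉ (PySem.Set.empty : PySem.Set Int) := by
            intro x _ _ hx; cases hx
          rw [← hnz]
          constructor
          · rintro ⟨hnd, -⟩
            exact_mod_cast (hK ▸ (nodup_iff_len nz).1 hnd)
          · intro hKeq
            refine ⟨(nodup_iff_len nz).2 ?_, htriv⟩
            rw [← hK]
            exact_mod_cast hKeq
        -- final case analysis
        by_cases hdf : nzDF numbers PySem.Set.empty = true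
        · rw [if_pos hdf]
          have hKeq : (K : Int) = (nz.length : Int) := hdfiff.1 hdf
          rw [decide_eq_true (show b - a ≤ n - 1 by omega)]
          by_cases hne : need = 0
          · rw [if_pos hne]
          · rw [if_neg hne]
            have h0mem : (0 : Int) ∈ numbers := by
              by_contra h0
              have hZ0 : Z = 0 := by rw [hZ]; exact List.count_eq_zero_of_not_mem h0
              have hz0' : z01 = 0 := by
                rw [hz01, if_neg (fun hcnd => h0 hcnd.1)]
              rw [hneedv, hlenI, hZ0, hz0'] at hne
              omega
            rw [hd2c, List.contains_iff_mem.2 h0mem, if_pos rfl, hd2g]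
            rw [decide_eq_true (show need = (Z : Int) - (z01 : Int) by omega)]
        · rw [if_neg hdf]
          have hKlt : (K : Int) < (nz.length : Int) :=
            lt_of_le_of_ne hKle (fun h => hdf (hdfiff.2 h))
          have hne : ¬ need = 0 := by omega
          rw [if_neg hne]
          by_cases hc0 : d2.contains 0 = true
          · rw [if_pos hc0, hd2g]
            rw [decide_eq_false (show ¬ need = (Z : Int) - (z01 : Int) by omega)]
          · rw [if_neg hc0]

-- ===== VERDICT (by name: the statement is the Claim_ definition above) =====
theorem IsContinuous_spec : Claim_equal_IsContinuous := by
  intro numbers _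
  unfold Spec_IsContinuous
  exact main_eq numbers
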